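-- pv_equiv track=rewrite | github.com/Yi-Pu/Statistical_computing | cows/crowded_cows.py | crowded_cows
-- ===== SOURCE A (Python) =====
-- def crowded_cows(cows, k):
--     # Raise error if the input is not valid
--     if isinstance(k, int) is False:
--         raise ValueError("k should be an integer")
--
--     # Raise error if the input list is not valid
--     if len(cows) == 0:
--         raise ValueError("you should input a valid list of cows")
--
--     # construct a dictionary where the key is the breed ID of a cow,
--     # and value is a list of indices where the cow is
--     d = {}
--     for i, cow in enumerate(cows):
--         d.setdefault(cow, []).append(i)
--
--     # traverse the dictionary and
--     # calculate the maximum distance within each breed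
--     # List of breed that's crowded
--     crowded_breed = []
--     for breed in d.keys():
--         index_list = d[breed]
--         dis = max(index_list) - min(index_list)
--         if (dis <= k) & (dis > 0):
--             crowded_breed.append(int(breed))
--
--     if len(crowded_breed) == 0:
--         return -1
--     else:
--         return max(crowded_breed)
-- ===== SOURCE B (Python) =====
-- def crowded_cows(cows, k):
--     if isinstance(k, int) is False:
--         raise ValueError("k should be an integer")
--     if len(cows) == 0:
--         raise ValueError("you should input a valid list of cows")
--     # Candidate breeds from largest to smallest; for each, the span is the
--     # distance between its first occurrence and its last occurrence (found by
--     # scanning from the back via the reversed list).  The first candidate whose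
--     # span lies in (0, k] is the answer, so we can return immediately.
--     for breed in sorted(set(cows), reverse=True):
--         first = cows.index(breed)
--         last = len(cows) - 1 - cows[::-1].index(breed)
--         if 0 < last - first <= k:
--             return int(breed)
--     return -1
-- ===== Notes on version B (the rewrite author's own statement) =====
-- stated objective: alternative
-- what changed: A builds a dict of all occurrence indices per breed in one pass and then max/mins each list, collecting qualifying breeds and taking their max; B builds no dict at all: it sorts the distinct breeds in descending order and, for each candidate from the largest down, locates its first and last occurrence directly with list.index on the list and its reversal, returning the first breed whose span lies in (0, k] (early exit), -1 if none.
import Mathlib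
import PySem

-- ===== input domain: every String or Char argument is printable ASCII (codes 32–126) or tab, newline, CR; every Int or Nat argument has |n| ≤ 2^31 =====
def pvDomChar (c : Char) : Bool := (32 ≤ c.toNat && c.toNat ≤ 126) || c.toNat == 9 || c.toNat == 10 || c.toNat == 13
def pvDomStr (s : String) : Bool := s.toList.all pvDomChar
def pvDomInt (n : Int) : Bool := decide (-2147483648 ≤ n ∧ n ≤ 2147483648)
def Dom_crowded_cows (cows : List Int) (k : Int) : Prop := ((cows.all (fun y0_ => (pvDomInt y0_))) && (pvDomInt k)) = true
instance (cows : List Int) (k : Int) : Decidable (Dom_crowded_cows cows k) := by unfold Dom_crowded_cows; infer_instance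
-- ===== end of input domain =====

-- B drops A's dict of per-breed index lists entirely: it sorts the distinct breeds
-- descending and returns the first one whose first/last occurrence span (found with
-- list.index on the list and its reversal) lies in (0, k] — an alternative algorithm.

-- ===== PORT A =====
-- d = {}; for i, cow in enumerate(cows): d.setdefault(cow, []).append(i)
-- then collect qualifying breeds and return -1 if none else max(crowded_breed)
def crowded_cows (cows : List Int) (k : Int) : Int :=
  -- isinstance(k, int) always holds under the type convention; len(cows)==0 raises → Pre_
  let d : PySem.Dict Int (List Int) :=
    (PySem.List.enumerate cows 0).foldl
      (fun d p => d.modify p.2 [] (fun l => l ++ [p.1])) PySem.Dict.empty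
  let crowded_breed : List Int :=
    d.keys.foldl
      (fun acc breed =>
        let index_list := d.getD breed []
        match PySem.List.max? index_list (fun y => y),
              PySem.List.min? index_list (fun y => y) with
        | some mx, some mn =>
          let dis := mx - mn
          if dis ≤ k ∧ dis > 0 then acc ++ [breed] else acc
        | _, _ => acc)  -- unreachable: every stored index list is nonempty
      []
  match PySem.List.max? crowded_breed (fun y => y) with
  | none => -1
  | some m => m

-- ===== PORT B =====
-- for breed in sorted(set(cows), reverse=True):
--   first = cows.index(breed); last = len(cows) - 1 - cows[::-1].index(breed)
--   if 0 < last - first <= k: return int(breed)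
-- return -1
def ccAltLoop (cows : List Int) (k : Int) : List Int → Int
  | [] => -1
  | breed :: rest =>
    -- cows[::-1] is slice?; it is `some` for step -1 (PySem.List.slice?_none_none_neg_one)
    match PySem.List.index? cows breed with
    | none => ccAltLoop cows k rest
      -- unreachable: breed ∈ set(cows), so .index finds it (Python would raise ValueError)
    | some first =>
      match PySem.List.index? ((PySem.List.slice? cows none none (-1)).getD []) breed with
      | none => ccAltLoop cows k rest  -- unreachable likewise
      | some ridx =>
        let last : Int := (cows.length : Int) - 1 - (ridx : Int)
        if 0 < last - (first : Int) ∧ last - (first : Int) ≤ k then breed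
        else ccAltLoop cows k rest

def crowded_cows_alt (cows : List Int) (k : Int) : Int :=
  ccAltLoop cows k (PySem.List.sorted (PySem.Set.ofList cows) (fun y => y) true)

-- ===== PRECONDITION & SPEC =====
-- Python A raises ValueError on the empty cows list, so Pre_ excludes it (B raises there too).
def Pre_crowded_cows (cows : List Int) (k : Int) : Prop := cows ≠ []
instance (cows : List Int) (k : Int) : Decidable (Pre_crowded_cows cows k) := by
  unfold Pre_crowded_cows; infer_instance
def pvWitness_crowded_cows : List Int × Int := ([1, 2, 1], 2)

def Spec_crowded_cows (cows : List Int) (k : Int) (out : Int) : Prop := out = crowded_cows_alt cows k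
instance (cows : List Int) (k : Int) (out : Int) : Decidable (Spec_crowded_cows cows k out) := by unfold Spec_crowded_cows; infer_instance

-- ===== CLAIM (what is proved, stated in full; the proofs are below) =====
def Claim_equal_crowded_cows : Prop := ∀ (cows : List Int) (k : Int), Dom_crowded_cows cows k → Pre_crowded_cows cows k → Spec_crowded_cows cows k (crowded_cows cows k)

-- ===== LEMMAS AND PROOFS =====

-- the ascending list of indices at which breed b occurs in cows
def pvOcc (cows : List Int) (b : Int) : List Int :=
  ((PySem.List.enumerate cows 0).filter (fun p => p.2 == b)).map (·.1)

-- first / last occurrence index of b, as B computes them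
def pvFirst (cows : List Int) (b : Int) : Int :=
  (((PySem.List.index? cows b).getD 0 : Nat) : Int)

def pvLast (cows : List Int) (b : Int) : Int :=
  (cows.length : Int) - 1 - (((PySem.List.index? cows.reverse b).getD 0 : Nat) : Int)

-- "breed b is crowded"
def pvPb (cows : List Int) (k : Int) (b : Int) : Bool :=
  decide (0 < pvLast cows b - pvFirst cows b ∧ pvLast cows b - pvFirst cows b ≤ k)

-- A's dict maps each breed to exactly its occurrence-index list
theorem pvDict_getD (L : List (Int × Int)) :
    ∀ (d : PySem.Dict Int (List Int)) (b : Int),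
      ((L.foldl (fun d p => d.modify p.2 [] (fun l => l ++ [p.1])) d).getD b [])
        = d.getD b [] ++ (L.filter (fun p => p.2 == b)).map (·.1) := by
  induction L with
  | nil => intro d b; simp
  | cons p L ih =>
    intro d b
    simp only [List.foldl_cons, ih, List.filter_cons]
    rw [PySem.Dict.getD_modify]
    by_cases hb : b = p.2
    · subst hb
      simp
    · rw [if_neg hb]
      have hbeq : (p.2 == b) = false := by simp [Ne.symm hb]
      rw [hbeq]
      simp

-- keys of A's dict = breeds occurring in the processed pairs
theorem pvDict_keys (L : List (Int × Int)) :
    ∀ (d : PySem.Dict Int (List Int)) (b : Int),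
      ((L.foldl (fun d p => d.modify p.2 [] (fun l => l ++ [p.1])) d).contains b)
        = (d.contains b || decide (b ∈ L.map (·.2))) := by
  induction L with
  | nil => intro d b; simp
  | cons p L ih =>
    intro d b
    simp only [List.foldl_cons, ih, PySem.Dict.contains_modify, List.map_cons, List.mem_cons]
    by_cases hb : b = p.2
    · simp [hb]
    · have hbeq : (b == p.2) = false := by simp [hb]
      simp [hbeq, hb]

-- membership in the occurrence list
theorem pvOcc_mem (cows : List Int) (b : Int) (i : Int) :
    i ∈ pvOcc cows b ↔ ∃ (j : Nat), ∃ (_ : j < cows.length), cows[j] = b ∧ i = (j : Int) := by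
  unfold pvOcc
  simp only [List.mem_map, List.mem_filter]
  constructor
  · rintro ⟨p, ⟨hmem, hsnd⟩, hfst⟩
    rw [PySem.List.mem_enumerate_iff] at hmem
    obtain ⟨j, hj, rfl⟩ := hmem
    simp only [beq_iff_eq] at hsnd
    exact ⟨j, hj, hsnd, by simpa using hfst.symm⟩
  · rintro ⟨j, hj, hb, rfl⟩
    refine ⟨((j : Int), cows[j]), ⟨?_, by simpa using hb⟩, rfl⟩
    rw [PySem.List.mem_enumerate_iff]
    exact ⟨j, hj, by simp⟩

-- min of the occurrence list = first occurrence (what cows.index returns)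
theorem pvMin_occ (cows : List Int) (b : Int) (hb : b ∈ cows) :
    PySem.List.min? (pvOcc cows b) (fun y => y) = some (pvFirst cows b) := by
  obtain ⟨n, hn⟩ := Option.isSome_iff_exists.mp ((PySem.List.index?_isSome_iff cows b).mpr hb)
  obtain ⟨hnlt, hnb, hfirst⟩ := PySem.List.getElem_of_index?_eq_some hn
  have hmem : (n : Int) ∈ pvOcc cows b := (pvOcc_mem cows b n).mpr ⟨n, hnlt, hnb, rfl⟩
  have hne : pvOcc cows b ≠ [] := by intro h; rw [h] at hmem; cases hmem
  obtain ⟨m, hm⟩ : ∃ m, PySem.List.min? (pvOcc cows b) (fun y => y) = some m := by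
    cases h : PySem.List.min? (pvOcc cows b) (fun y => y) with
    | none => exact absurd ((PySem.List.min?_eq_none_iff _ _).mp h) hne
    | some m => exact ⟨m, rfl⟩
  have hmmem := PySem.List.min?_mem hm
  obtain ⟨j, hj, hjb, rfl⟩ := (pvOcc_mem cows b m).mp hmmem
  have hlow : ∀ x ∈ pvOcc cows b, (j : Int) ≤ x := PySem.List.min?_isMin hm
  have hjn : n ≤ j := by
    by_contra h
    exact hfirst j (by omega) hjb
  have hnj : (j : Int) ≤ (n : Int) := hlow _ hmem
  have : j = n := by omega
  subst this
  rw [hm]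
  unfold pvFirst
  rw [hn]
  rfl

-- max of the occurrence list = last occurrence (len - 1 - reversed.index)
theorem pvMax_occ (cows : List Int) (b : Int) (hb : b ∈ cows) :
    PySem.List.max? (pvOcc cows b) (fun y => y) = some (pvLast cows b) := by
  have hbrev : b ∈ cows.reverse := List.mem_reverse.mpr hb
  obtain ⟨r, hr⟩ := Option.isSome_iff_exists.mp ((PySem.List.index?_isSome_iff cows.reverse b).mpr hbrev)
  obtain ⟨hrlt, hrb, hfirst⟩ := PySem.List.getElem_of_index?_eq_some hr
  rw [List.length_reverse] at hrlt
  have hrb' : cows[cows.length - 1 - r]'(by omega) = b := by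
    rw [← hrb]; rw [List.getElem_reverse]
  have hmem : ((cows.length - 1 - r : Nat) : Int) ∈ pvOcc cows b :=
    (pvOcc_mem cows b _).mpr ⟨cows.length - 1 - r, by omega, hrb', rfl⟩
  have hne : pvOcc cows b ≠ [] := by intro h; rw [h] at hmem; cases hmem
  obtain ⟨m, hm⟩ : ∃ m, PySem.List.max? (pvOcc cows b) (fun y => y) = some m := by
    cases h : PySem.List.max? (pvOcc cows b) (fun y => y) with
    | none => exact absurd ((PySem.List.max?_eq_none_iff _ _).mp h) hne
    | some m => exact ⟨m, rfl⟩
  obtain ⟨j, hj, hjb, rfl⟩ := (pvOcc_mem cows b m).mp (PySem.List.max?_mem hm)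
  have hhigh : ∀ x ∈ pvOcc cows b, x ≤ (j : Int) := PySem.List.max?_isMax hm
  -- j is the largest occurrence; show j = cows.length - 1 - r
  have hjle : j ≤ cows.length - 1 - r := by
    by_contra h
    rw [Nat.not_le] at h
    -- then cows.reverse[cows.length - 1 - j] = b with index < r: contradiction
    have hlt : cows.length - 1 - j < r := by omega
    have : cows.reverse[cows.length - 1 - j]'(by rw [List.length_reverse]; omega) = b := by
      rw [List.getElem_reverse]
      have : cows.length - 1 - (cows.length - 1 - j) = j := by omega
      simp only [this]
      exact hjb
    exact hfirst _ hlt this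
  have hgej : ((cows.length - 1 - r : Nat) : Int) ≤ (j : Int) := hhigh _ hmem
  have : j = cows.length - 1 - r := by omega
  subst this
  rw [hm]
  unfold pvLast
  rw [hr]
  simp only [Option.getD_some]
  congr 1
  omega

-- max over a list with the same members (id key) is the same
theorem pvMax?_congr_mem (l1 l2 : List Int) (h : ∀ x, x ∈ l1 ↔ x ∈ l2) :
    PySem.List.max? l1 (fun y => y) = PySem.List.max? l2 (fun y => y) := by
  cases h1 : PySem.List.max? l1 (fun y => y) with
  | none =>
    have : l1 = [] := (PySem.List.max?_eq_none_iff _ _).mp h1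
    subst this
    have : l2 = [] := by
      cases l2 with
      | nil => rfl
      | cons x t => exact absurd ((h x).mpr (List.mem_cons_self)) (by simp)
    rw [this, (PySem.List.max?_eq_none_iff _ _).mpr rfl]
  | some m1 =>
    cases h2 : PySem.List.max? l2 (fun y => y) with
    | none =>
      have : l2 = [] := (PySem.List.max?_eq_none_iff _ _).mp h2
      subst this
      exact absurd ((h m1).mp (PySem.List.max?_mem h1)) (by simp)
    | some m2 =>
      have hm1 : m1 ∈ l2 := (h m1).mp (PySem.List.max?_mem h1)
      have hm2 : m2 ∈ l1 := (h m2).mpr (PySem.List.max?_mem h2)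
      have h12 : m1 ≤ m2 := PySem.List.max?_isMax h2 m1 hm1
      have h21 : m2 ≤ m1 := PySem.List.max?_isMax h1 m2 hm2
      rw [le_antisymm h12 h21]

-- B's early-exit loop over a descending candidate list computes the max qualifying breed
theorem pvLoop_spec (cows : List Int) (k : Int) (L : List Int)
    (hmem : ∀ b ∈ L, b ∈ cows) (hdesc : L.Pairwise (fun a b => b ≤ a)) :
    ccAltLoop cows k L
      = (match PySem.List.max? (L.filter (fun b => pvPb cows k b)) (fun y => y) with
         | none => -1
         | some m => m) := by
  induction L with
  | nil => rfl
  | cons b bs ih =>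
    have hb : b ∈ cows := hmem b List.mem_cons_self
    obtain ⟨f, hf⟩ := Option.isSome_iff_exists.mp ((PySem.List.index?_isSome_iff cows b).mpr hb)
    have hbrev : b ∈ cows.reverse := List.mem_reverse.mpr hb
    obtain ⟨r, hrr⟩ := Option.isSome_iff_exists.mp ((PySem.List.index?_isSome_iff cows.reverse b).mpr hbrev)
    have hrev : (PySem.List.slice? cows none none (-1)).getD [] = cows.reverse := by
      rw [PySem.List.slice?_none_none_neg_one]; rfl
    have hPiff : (0 < ((cows.length : Int) - 1 - (r : Int)) - (f : Int)
        ∧ ((cows.length : Int) - 1 - (r : Int)) - (f : Int) ≤ k) ↔ pvPb cows k b = true := by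
      unfold pvPb pvFirst pvLast
      rw [hf, hrr]
      exact (decide_eq_true_iff).symm
    rw [List.pairwise_cons] at hdesc
    have ihs := ih (fun c hc => hmem c (List.mem_cons_of_mem b hc)) hdesc.2
    show (match PySem.List.index? cows b with
      | none => ccAltLoop cows k bs
      | some first =>
        match PySem.List.index? ((PySem.List.slice? cows none none (-1)).getD []) b with
        | none => ccAltLoop cows k bs
        | some ridx =>
          if 0 < ((cows.length : Int) - 1 - (ridx : Int)) - (first : Int)
              ∧ ((cows.length : Int) - 1 - (ridx : Int)) - (first : Int) ≤ k then b
          else ccAltLoop cows k bs) = _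
    rw [hrev, hf, hrr]
    simp only [List.filter_cons]
    by_cases hP : pvPb cows k b = true
    · rw [if_pos (hPiff.mpr hP)]
      rw [hP]
      rw [if_pos rfl]
      rw [PySem.List.max?_id_cons]
      have hmax : (List.filter (fun b => pvPb cows k b) bs).foldl max b = b := by
        rcases PySem.List.foldl_max_mem (List.filter (fun b => pvPb cows k b) bs) b with h | h
        · exact h
        · have h1 : (List.filter (fun b => pvPb cows k b) bs).foldl max b ≤ b :=
            hdesc.1 _ (List.mem_of_mem_filter h)
          have h2 := (PySem.List.le_foldl_max (List.filter (fun b => pvPb cows k b) bs) b).1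
          omega
      rw [hmax]
    · rw [if_neg (fun h => hP (hPiff.mp h))]
      rw [Bool.not_eq_true] at hP
      rw [hP]
      rw [if_neg (by simp)]
      exact ihs

theorem pvMain (cows : List Int) (k : Int) :
    crowded_cows cows k = crowded_cows_alt cows k := by
  simp only [crowded_cows, crowded_cows_alt]
  set dA : PySem.Dict Int (List Int) :=
    (PySem.List.enumerate cows 0).foldl
      (fun d p => d.modify p.2 [] (fun l => l ++ [p.1])) PySem.Dict.empty with hdA
  -- dict contents and key membership
  have hgetD : ∀ b, dA.getD b [] = pvOcc cows b := by
    intro b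
    rw [hdA, pvDict_getD, PySem.Dict.getD_empty]
    rfl
  have hkeysmem : ∀ b, b ∈ dA.keys ↔ b ∈ cows := by
    intro b
    have h1 := pvDict_keys (PySem.List.enumerate cows 0) PySem.Dict.empty b
    rw [← hdA, PySem.Dict.contains_empty, PySem.List.map_snd_enumerate] at h1
    constructor
    · intro h
      have := (PySem.Dict.contains_iff_mem_keys dA b).mpr h
      rw [h1] at this
      simpa using this
    · intro h
      apply (PySem.Dict.contains_iff_mem_keys dA b).mp
      rw [h1]
      simp [h]
  -- A's collection pass = filter by pvP over dA.keys
  have hA : dA.keys.foldl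
      (fun acc breed =>
        let index_list := dA.getD breed []
        match PySem.List.max? index_list (fun y => y),
              PySem.List.min? index_list (fun y => y) with
        | some mx, some mn =>
          let dis := mx - mn
          if dis ≤ k ∧ dis > 0 then acc ++ [breed] else acc
        | _, _ => acc) []
      = dA.keys.filter (fun b => pvPb cows k b) := by
    rw [PySem.List.foldl_congr_mem _ _
      (fun acc b => if pvPb cows k b then acc ++ [b] else acc) []
      (by
        intro acc b hbk
        have hb : b ∈ cows := (hkeysmem b).mp hbk
        simp only [hgetD b, pvMax_occ cows b hb, pvMin_occ cows b hb]
        have hiff : (pvLast cows b - pvFirst cows b ≤ k ∧ pvLast cows b - pvFirst cows b > 0)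
            ↔ (pvPb cows k b = true) := by
          unfold pvPb
          rw [decide_eq_true_iff]
          exact ⟨fun h => ⟨h.2, h.1⟩, fun h => ⟨h.2, h.1⟩⟩
        exact if_congr hiff rfl rfl)]
    rw [PySem.List.foldl_append_if_eq_filter]
    rfl
  rw [hA]
  -- B's loop
  rw [pvLoop_spec cows k (PySem.List.sorted (PySem.Set.ofList cows) (fun y => y) true)
    (fun b hbL => by
      rw [PySem.List.mem_sorted] at hbL
      exact (PySem.Set.mem_ofList cows b).mp hbL)
    (PySem.List.sorted_pairwise_rev (PySem.Set.ofList cows) (fun y => y))]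
  -- the two filtered lists have the same members, so the same max
  have hsame := pvMax?_congr_mem (dA.keys.filter (fun b => pvPb cows k b))
    ((PySem.List.sorted (PySem.Set.ofList cows) (fun y => y) true).filter (fun b => pvPb cows k b))
    (by
      intro x
      simp only [List.mem_filter, PySem.List.mem_sorted, PySem.Set.mem_ofList, hkeysmem x])
  rw [hsame]

-- ===== VERDICT (by name: the statement is the Claim_ definition above) =====
theorem crowded_cows_spec : Claim_equal_crowded_cows := by
  intro cows k _ _
  unfold Spec_crowded_cows
  exact pvMain cows k
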